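-- pv_equiv track=rewrite | github.com/miketheprogrammer/fueled | fueled/base/templatetags/generate.py | generate_rating_stars
-- ===== SOURCE A (Python) =====
-- def generate_rating_stars(value):
--     value = int(value)
--     html = ""
--     for i in range(value):
--         html += '<i class="icon-star star-yellow"></i>'
--     for i in range(value, 5):
--         html += '<i class="icon-star-empty star-black"></i>'
--     return html
-- ===== SOURCE B (Python) =====
-- FILLED_STAR = '<i class="icon-star star-yellow"></i>'
-- EMPTY_STAR = '<i class="icon-star-empty star-black"></i>'
--
--
-- def generate_rating_stars(value):
--     value = int(value)
--     return FILLED_STAR * value + EMPTY_STAR * (5 - value)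
-- ===== Notes on version B (the rewrite author's own statement) =====
-- stated objective: simpler
-- what changed: Replaces the two accumulation loops with a closed-form expression: filled * value + empty * (5 - value), relying on string repetition by a non-positive count being empty.
import Mathlib
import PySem

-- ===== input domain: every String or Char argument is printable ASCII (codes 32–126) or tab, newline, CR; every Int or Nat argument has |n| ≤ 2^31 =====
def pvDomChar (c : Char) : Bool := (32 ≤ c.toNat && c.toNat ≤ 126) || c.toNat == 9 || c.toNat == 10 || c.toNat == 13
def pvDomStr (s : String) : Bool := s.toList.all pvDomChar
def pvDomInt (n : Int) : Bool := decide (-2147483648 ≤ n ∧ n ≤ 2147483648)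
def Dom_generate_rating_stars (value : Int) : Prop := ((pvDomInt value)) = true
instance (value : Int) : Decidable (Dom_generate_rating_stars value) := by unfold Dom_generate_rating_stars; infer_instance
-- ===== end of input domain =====

-- B replaces A's two accumulation loops by a closed-form string repetition (simpler; same values).

-- ===== PORT A =====
def generate_rating_stars (value : Int) : String :=
  let html := ""
  let html := (PySem.List.pyRange 0 value 1).foldl
    (fun h _ => h ++ "<i class=\"icon-star star-yellow\"></i>") html
  let html := (PySem.List.pyRange value 5 1).foldl
    (fun h _ => h ++ "<i class=\"icon-star-empty star-black\"></i>") html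
  html

-- ===== PORT B =====
-- Python's  s * n  (empty for n ≤ 0)
def pvStrMul (s : String) (n : Int) : String := String.join (List.replicate n.toNat s)

def generate_rating_stars_alt (value : Int) : String :=
  pvStrMul "<i class=\"icon-star star-yellow\"></i>" value ++
  pvStrMul "<i class=\"icon-star-empty star-black\"></i>" (5 - value)

-- ===== PRECONDITION & SPEC =====
def Spec_generate_rating_stars (value : Int) (out : String) : Prop := out = generate_rating_stars_alt value
instance (value : Int) (out : String) : Decidable (Spec_generate_rating_stars value out) := by unfold Spec_generate_rating_stars; infer_instance

-- ===== CLAIM (what is proved, stated in full; the proofs are below) =====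
def Claim_equal_generate_rating_stars : Prop := ∀ (value : Int), Dom_generate_rating_stars value → Spec_generate_rating_stars value (generate_rating_stars value)

-- ===== LEMMAS AND PROOFS =====
theorem foldl_str_append_init (l : List String) (a : String) :
    List.foldl (fun r s => r ++ s) a l = a ++ List.foldl (fun r s => r ++ s) "" l := by
  induction l generalizing a with
  | nil => simp
  | cons x t ih =>
      simp only [List.foldl_cons]
      rw [ih (a ++ x), ih ("" ++ x)]
      simp [String.append_assoc]

theorem foldl_const_append (l : List Int) (s h : String) :
    l.foldl (fun h _ => h ++ s) h = h ++ String.join (List.replicate l.length s) := by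
  induction l generalizing h with
  | nil => simp [String.join]
  | cons x t ih =>
      simp only [List.foldl_cons, ih, List.length_cons, List.replicate_succ, String.join]
      rw [foldl_str_append_init, foldl_str_append_init ((List.replicate t.length s)) ("" ++ s)]
      simp [String.append_assoc]

-- ===== VERDICT (by name: the statement is the Claim_ definition above) =====
theorem generate_rating_stars_spec : Claim_equal_generate_rating_stars := by
  intro value _
  show _ = _
  simp [generate_rating_stars, generate_rating_stars_alt, pvStrMul,
        foldl_const_append, PySem.List.length_pyRange_one]
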